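-- pv_equiv track=rewrite | github.com/ChrisKolios/CPS109_Fall2022 | Lab4/Quizzes/Quiz_Thursday_8am_SampleSoln.py | find_missing_passenger
-- ===== SOURCE A (Python) =====
-- def find_missing_passenger(list_of_train_passenger_lists, passenger_to_find):
-- 	"""
-- 	Trains are vast - networks of trains even more so. Sometimes a passenger goes missing, and your must find them from among the trains, lest they continue, forgotten, past the end of the world...
-- 	Given some passenger, and a list of train lists of passengers, return the index of the train that they are on, and the index of their location on that train.
-- 	If multiple occurrences of the same passenger appear across the trains, then return the index of the passenger which occurs closest to the end of their train, and at the latest train in the list.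
-- 	Those who go missing tend to get pushed towards the end of the trains, never to return...
--
-- 	Input Arguments:
-- 		list_of_train_passenger_lists (list of (list of strings)): The list of train_passenger_lists from different trains
-- 		passenger_to_find (string): The name of the passenger you're trying to find
-- 	Return:
-- 		train_index, within_train_index (int, int): The index of the train the passenger you're trying to find is on, and their location (index) within that train
-- 	Behaviour:
-- 		Try to locate passenger_to_find from within the lists of passengers in the list of trains
-- 		In the case of multiple passengers having the same name within a single train list, break ties by picking the backmost instance of the passenger (i.e. the one latest in the list of passengers)
-- 		In the case of multiple passengers having the same name from among multiple trains, pick the passenger who occurs latest in their respective train, and in the case of ties,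
-- 		the passenger who occurs in the backmost train (i.e. the one latest in the list of trains)
-- 		If the passenger does not appear in any of the lists, return -1, -1
-- 		If the passenger has been successfully located, return the index of the train they are on, then the index of their location within that train
-- 	"""
--
-- 	train_index = -1
-- 	within_train_index = -1
-- 	max_len = 0
-- 	for train_passenger_list in list_of_train_passenger_lists:
-- 		if (len(train_passenger_list) > max_len):
-- 			max_len = len(train_passenger_list)
-- 	distance_to_end_of_train = max_len # We set our initial distance to end of train to the maximum length across all lists...
--
-- 	for i in range (len(list_of_train_passenger_lists)): # For each train passenger list...
-- 		train_passenger_list = list_of_train_passenger_lists[i]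
--
-- 		for j in range(len(train_passenger_list)):
-- 			if (train_passenger_list[j] == passenger_to_find): # If the passenger at that index is the one we want to find...
-- 				temp_distance_to_end_of_train = len(train_passenger_list) - j
-- 				if (temp_distance_to_end_of_train < distance_to_end_of_train): # If strictly less (i.e. comes closest to end of list)
-- 					train_index = i
-- 					within_train_index = j
-- 					distance_to_end_of_train = temp_distance_to_end_of_train # Update our minimum distance
-- 				elif (temp_distance_to_end_of_train == distance_to_end_of_train): # In the case of a tie...
-- 					if (i > train_index): # We pick the greatest train index
-- 						train_index = i
-- 						within_train_index = j
-- 						distance_to_end_of_train = temp_distance_to_end_of_train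
-- 	return train_index, within_train_index
-- ===== SOURCE B (Python) =====
-- def find_missing_passenger(list_of_train_passenger_lists, passenger_to_find):
--     # One candidate per train: scan the train in reverse, break at the first
--     # (i.e. backmost) match; keep the overall best by (smallest distance to the
--     # end of its train, latest train index).
--     best = None  # (distance_to_end_of_train, train_index, within_train_index)
--     for i, train in enumerate(list_of_train_passenger_lists):
--         for j in range(len(train) - 1, -1, -1):
--             if train[j] == passenger_to_find:
--                 d = len(train) - j
--                 if best is None or d <= best[0]:
--                     best = (d, i, j)
--                 break
--     if best is None:
--         return -1, -1
--     return best[1], best[2]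
-- ===== Notes on version B (the rewrite author's own statement) =====
-- stated objective: simpler
-- what changed: Replaces A's max-length pre-pass plus full nested forward scan with a single pass that reduces each train to one candidate via a reverse scan that breaks at the backmost match, then keeps the best candidate by (distance-to-end, latest-train) key.
import Mathlib
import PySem

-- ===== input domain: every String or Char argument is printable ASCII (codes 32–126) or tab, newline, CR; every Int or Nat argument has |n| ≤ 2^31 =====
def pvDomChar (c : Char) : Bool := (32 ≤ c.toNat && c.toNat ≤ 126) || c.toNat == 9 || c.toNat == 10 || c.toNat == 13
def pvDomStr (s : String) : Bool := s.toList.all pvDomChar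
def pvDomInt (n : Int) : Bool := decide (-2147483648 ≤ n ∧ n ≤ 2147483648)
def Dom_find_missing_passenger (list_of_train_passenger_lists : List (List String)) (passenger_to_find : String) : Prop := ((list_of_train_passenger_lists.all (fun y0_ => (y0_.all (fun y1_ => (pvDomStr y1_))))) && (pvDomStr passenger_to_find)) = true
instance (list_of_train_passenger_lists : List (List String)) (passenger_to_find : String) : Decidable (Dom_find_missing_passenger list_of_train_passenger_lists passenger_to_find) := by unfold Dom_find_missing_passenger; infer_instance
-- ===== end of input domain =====

-- B replaces A's max-length pre-pass and full nested forward scan by one pass that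
-- reduces each train to its backmost occurrence (reverse scan, break at first match)
-- and keeps the best candidate by (distance-to-end, latest train) — objective: simpler.


-- ===== PORT A =====
-- Body of A's inner loop: state is (train_index, within_train_index, distance_to_end_of_train),
-- jx is the enumerated (j, passenger) of the current train, L = len(train_passenger_list).
def fmpStepA (L i : Int) (p : String) (s : Int × Int × Int) (jx : Int × String) : Int × Int × Int :=
  if jx.2 == p then
    let d := L - jx.1
    if d < s.2.2 then (i, jx.1, d)
    else if d == s.2.2 then (if i > s.1 then (i, jx.1, d) else s)
    else s
  else s

def find_missing_passenger (list_of_train_passenger_lists : List (List String)) (passenger_to_find : String) : Int × Int :=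
  let max_len : Int := list_of_train_passenger_lists.foldl
    (fun m t => if (t.length : Int) > m then (t.length : Int) else m) 0
  let s := (PySem.List.enumerate list_of_train_passenger_lists 0).foldl
    (fun s it => (PySem.List.enumerate it.2 0).foldl
      (fmpStepA (it.2.length : Int) it.1 passenger_to_find) s)
    (-1, -1, max_len)
  (s.1, s.2.1)

-- ===== PORT B =====
-- Reverse scan with break: index (in the whole list) of the BACKMOST occurrence of p.
def fmpBack (t : List String) (p : String) : Option Int :=
  match t with
  | [] => none
  | x :: xs =>
    match fmpBack xs p with
    | some j => some (j + 1)
    | none => if x == p then some 0 else none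

-- Merge one train's candidate into the running best (d, i, j): smaller d wins,
-- equal d replaces (later train wins).
def fmpMerge (p : String) (best : Option (Int × Int × Int)) (it : Int × List String) :
    Option (Int × Int × Int) :=
  match fmpBack it.2 p with
  | none => best
  | some j =>
    let d := (it.2.length : Int) - j
    match best with
    | none => some (d, it.1, j)
    | some b => if d ≤ b.1 then some (d, it.1, j) else best

def find_missing_passenger_alt (list_of_train_passenger_lists : List (List String)) (passenger_to_find : String) : Int × Int :=
  match (PySem.List.enumerate list_of_train_passenger_lists 0).foldl (fmpMerge passenger_to_find) none with
  | none => (-1, -1)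
  | some b => (b.2.1, b.2.2)

-- ===== PRECONDITION & SPEC =====
def Spec_find_missing_passenger (list_of_train_passenger_lists : List (List String)) (passenger_to_find : String) (out : Int × Int) : Prop := out = find_missing_passenger_alt list_of_train_passenger_lists passenger_to_find
instance (list_of_train_passenger_lists : List (List String)) (passenger_to_find : String) (out : Int × Int) : Decidable (Spec_find_missing_passenger list_of_train_passenger_lists passenger_to_find out) := by unfold Spec_find_missing_passenger; infer_instance

-- ===== CLAIM (what is proved, stated in full; the proofs are below) =====
def Claim_equal_find_missing_passenger : Prop := ∀ (list_of_train_passenger_lists : List (List String)) (passenger_to_find : String), Dom_find_missing_passenger list_of_train_passenger_lists passenger_to_find → Spec_find_missing_passenger list_of_train_passenger_lists passenger_to_find (find_missing_passenger list_of_train_passenger_lists passenger_to_find)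

-- ===== LEMMAS AND PROOFS =====

lemma fmpBack_bounds (p : String) : ∀ (t : List String) (j : Int),
    fmpBack t p = some j → 0 ≤ j ∧ j < (t.length : Int) := by
  intro t
  induction t with
  | nil => intro j h; simp [fmpBack] at h
  | cons x xs ih =>
    intro j h
    simp only [fmpBack] at h
    cases hb : fmpBack xs p with
    | some j' =>
      rw [hb] at h
      have := ih j' hb
      simp at h
      simp [List.length_cons]
      omega
    | none =>
      rw [hb] at h
      by_cases hx : x == p
      · simp [hx] at h; simp [List.length_cons]; omega
      · simp [hx] at h

lemma fmpBack_append_singleton (p : String) : ∀ (ys : List String) (x : String),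
    fmpBack (ys ++ [x]) p =
      (if x == p then some (ys.length : Int) else fmpBack ys p) := by
  intro ys x
  induction ys with
  | nil => by_cases hx : x == p <;> simp [fmpBack, hx]
  | cons y ys ih =>
    simp only [List.cons_append, fmpBack, ih]
    by_cases hx : x == p
    · simp [hx]
    · simp [hx]

-- A's inner loop over one train, characterized by the backmost occurrence.
-- A's inner loop over one train, characterized by the backmost occurrence.
lemma innerA_eq (p : String) (L i : Int) : ∀ (t : List String) (s : Int × Int × Int),
    s.1 < i →
    (PySem.List.enumerate t 0).foldl (fmpStepA L i p) s =
      (match fmpBack t p with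
       | none => s
       | some j => if L - j ≤ s.2.2 then (i, j, L - j) else s) := by
  intro t
  induction t using List.reverseRecOn with
  | nil => intro s _; simp [fmpBack]
  | append_singleton ys x ih =>
    intro s hs
    obtain ⟨ti, wi, dist⟩ := s
    simp only at hs
    rw [PySem.List.enumerate_append, List.foldl_append, fmpBack_append_singleton,
        ih (ti, wi, dist) hs]
    simp only [PySem.List.enumerate_cons, PySem.List.enumerate_nil, List.foldl_cons,
      List.foldl_nil, zero_add]
    by_cases hx : (x == p) = true
    · rw [if_pos hx]
      cases hb : fmpBack ys p with
      | none =>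
        simp only [fmpStepA, hx, if_true]
        split_ifs with h1 h2 h3 <;> simp_all <;> omega
      | some j =>
        have hj := fmpBack_bounds p ys j hb
        simp only
        by_cases h1 : L - j ≤ dist
        · rw [if_pos h1]
          simp only [fmpStepA, hx, if_true]
          have hlt : L - (ys.length : Int) < L - j := by omega
          split_ifs with h2 <;> (simp_all; try omega)
        · rw [if_neg h1]
          simp only [fmpStepA, hx, if_true]
          split_ifs with h2 h3 h4 <;> simp_all <;> omega
    · rw [if_neg hx]
      cases hb : fmpBack ys p with
      | none => simp [fmpStepA, hx]
      | some j =>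
        simp only
        split_ifs with h1 <;> simp [fmpStepA, hx]

-- The outer pass: A's running (train_index, within_train_index, distance) state and
-- B's running best candidate stay in lockstep.
lemma outer_eq (p : String) : ∀ (rest : List (List String)) (k ti wi dist : Int)
    (b : Option (Int × Int × Int)),
    0 ≤ k →
    ((b = none ∧ ti = -1 ∧ wi = -1 ∧ ∀ t ∈ rest, (t.length : Int) ≤ dist) ∨
     (∃ d j, b = some (d, ti, j) ∧ wi = j ∧ dist = d ∧ ti < k)) →
    (let sA := (PySem.List.enumerate rest k).foldl
        (fun s it => (PySem.List.enumerate it.2 0).foldl (fmpStepA (it.2.length : Int) it.1 p) s)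
        (ti, wi, dist)
     (sA.1, sA.2.1) =
      (match (PySem.List.enumerate rest k).foldl (fmpMerge p) b with
       | none => ((-1 : Int), (-1 : Int))
       | some c => (c.2.1, c.2.2))) := by
  intro rest
  induction rest with
  | nil =>
    intro k ti wi dist b hk h
    rcases h with ⟨hb, hti, hwi, _⟩ | ⟨d, j, hb, hwi, hdist, _⟩
    · simp [PySem.List.enumerate_nil, hb, hti, hwi]
    · simp [PySem.List.enumerate_nil, hb, hwi]
  | cons t rest ih =>
    intro k ti wi dist b hk h
    simp only [PySem.List.enumerate_cons, List.foldl_cons]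
    have hti_lt : ti < k := by
      rcases h with ⟨_, hti, _, _⟩ | ⟨d, j, _, _, _, hlt⟩ <;> omega
    rw [innerA_eq p (t.length : Int) k t (ti, wi, dist) hti_lt]
    cases hback : fmpBack t p with
    | none =>
      simp only [fmpMerge, hback]
      apply ih (k + 1) ti wi dist b (by omega)
      rcases h with ⟨hb, hti, hwi, hlen⟩ | ⟨d, j, hb, hwi, hdist, hlt⟩
      · exact Or.inl ⟨hb, hti, hwi, fun u hu => hlen u (List.mem_cons_of_mem _ hu)⟩
      · exact Or.inr ⟨d, j, hb, hwi, hdist, by omega⟩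
    | some j =>
      have hj := fmpBack_bounds p t j hback
      simp only [fmpMerge, hback]
      rcases h with ⟨hb, hti, hwi, hlen⟩ | ⟨d, j0, hb, hwi, hdist, hlt⟩
      · have hle : (t.length : Int) - j ≤ dist := by
          have := hlen t (List.mem_cons_self ..)
          omega
        simp only [hb, if_pos hle]
        apply ih (k + 1) k j ((t.length : Int) - j) (some ((t.length : Int) - j, k, j)) (by omega)
        exact Or.inr ⟨_, j, rfl, rfl, rfl, by omega⟩
      · subst hb hwi hdist
        by_cases hle : (t.length : Int) - j ≤ dist
        · simp only [if_pos hle]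
          apply ih (k + 1) k j ((t.length : Int) - j) (some ((t.length : Int) - j, k, j)) (by omega)
          exact Or.inr ⟨_, j, rfl, rfl, rfl, by omega⟩
        · simp only [if_neg hle]
          apply ih (k + 1) ti wi dist (some (dist, ti, wi)) (by omega)
          exact Or.inr ⟨_, wi, rfl, rfl, rfl, by omega⟩

lemma le_fmaxFold : ∀ (l : List (List String)) (m : Int),
    m ≤ l.foldl (fun m t => if (t.length : Int) > m then (t.length : Int) else m) m ∧
    ∀ t ∈ l, (t.length : Int) ≤ l.foldl (fun m t => if (t.length : Int) > m then (t.length : Int) else m) m := by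
  intro l
  induction l with
  | nil => intro m; simp
  | cons x l ih =>
    intro m
    simp only [List.foldl_cons, List.mem_cons]
    constructor
    · have := (ih (if (x.length : Int) > m then (x.length : Int) else m)).1
      split_ifs at * <;> omega
    · rintro t (rfl | ht)
      · have := (ih (if (t.length : Int) > m then (t.length : Int) else m)).1
        split_ifs at * <;> omega
      · exact (ih _).2 t ht

-- ===== VERDICT (by name: the statement is the Claim_ definition above) =====
theorem find_missing_passenger_spec : Claim_equal_find_missing_passenger := by
  intro lists p _
  unfold Spec_find_missing_passenger find_missing_passenger find_missing_passenger_alt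
  exact outer_eq p lists 0 (-1) (-1) _ none le_rfl
    (Or.inl ⟨rfl, rfl, rfl, (le_fmaxFold lists 0).2⟩)
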